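-- pv_equiv track=rewrite | github.com/wlstj23207-coder/cardnews | ductor_bot/cli_commands/agents.py | _parse_agents_subcommand
-- ===== SOURCE A (Python) =====
-- _AGENTS_SUBCOMMANDS = frozenset({"list", "add", "remove"})
--
-- def _parse_agents_subcommand(args: list[str]) -> tuple[str | None, list[str]]:
--     """Extract the subcommand and remaining args after 'agents'."""
--     found = False
--     sub: str | None = None
--     rest: list[str] = []
--     for a in args:
--         if a.startswith("-"):
--             continue
--         if not found and a == "agents":
--             found = True
--             continue
--         if found and sub is None:
--             sub = a if a in _AGENTS_SUBCOMMANDS else None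
--             if sub is None:
--                 # Unknown subcommand — show help
--                 return None, []
--             continue
--         if found and sub is not None:
--             rest.append(a)
--     if found and sub is None:
--         # bare "ductor agents" → default to list
--         return "list", []
--     return sub, rest
-- ===== SOURCE B (Python) =====
-- _AGENTS_SUBCOMMANDS = frozenset({"list", "add", "remove"})
--
-- def _parse_agents_subcommand(args):
--     """Extract the subcommand and remaining args after 'agents'."""
--     toks = [a for a in args if not a.startswith("-")]
--     if "agents" not in toks:
--         return None, []
--     tail = toks[toks.index("agents") + 1:]
--     if not tail:
--         return "list", []
--     sub, rest = tail[0], tail[1:]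
--     if sub not in _AGENTS_SUBCOMMANDS:
--         return None, []
--     return sub, rest
-- ===== Notes on version B (the rewrite author's own statement) =====
-- stated objective: simpler
-- what changed: Replaces A's stateful loop with found/sub/rest flags and mid-loop returns by a declarative pipeline: filter out flag tokens once, then locate 'agents' and split the remaining slice.
import Mathlib
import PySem

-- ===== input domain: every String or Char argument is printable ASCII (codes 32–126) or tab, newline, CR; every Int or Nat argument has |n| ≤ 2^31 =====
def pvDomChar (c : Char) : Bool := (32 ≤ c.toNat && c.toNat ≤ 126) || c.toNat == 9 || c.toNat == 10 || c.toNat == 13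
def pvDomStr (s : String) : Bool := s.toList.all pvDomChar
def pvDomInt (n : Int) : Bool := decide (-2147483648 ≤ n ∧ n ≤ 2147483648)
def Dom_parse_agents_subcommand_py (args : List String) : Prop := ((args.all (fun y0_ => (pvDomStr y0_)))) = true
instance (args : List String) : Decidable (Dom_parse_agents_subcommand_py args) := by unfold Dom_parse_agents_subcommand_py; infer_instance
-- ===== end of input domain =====

-- B replaces A's stateful scan (found/sub/rest flags and mid-loop returns) by a filter-then-slice pipeline; objective: simpler.

def AGENTS_SUBCOMMANDS : PySem.Set String := PySem.Set.ofList ["list", "add", "remove"]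

-- ===== PORT A =====
-- the loop of A, state (found, sub, rest); branches in A's order
def parse_agents_go (found : Bool) (sub : Option String) (rest : List String) :
    List String → Option String × List String
  | [] => if found && sub.isNone then (some "list", []) else (sub, rest)
  | a :: t =>
    if PySem.Str.startswith a "-" then parse_agents_go found sub rest t
    else if !found && a == "agents" then parse_agents_go true sub rest t
    else if found && sub.isNone then
      (if PySem.Set.contains AGENTS_SUBCOMMANDS a then parse_agents_go found (some a) rest t
       else (none, []))
    else if found && sub.isSome then parse_agents_go found sub (rest ++ [a]) t
    else parse_agents_go found sub rest t

def parse_agents_subcommand_py (args : List String) : Option String × List String :=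
  parse_agents_go false none [] args

-- ===== PORT B =====
def parse_agents_subcommand_py_alt (args : List String) : Option String × List String :=
  let toks := args.filter (fun a => !(PySem.Str.startswith a "-"))
  if !(toks.contains "agents") then (none, [])
  else
    let tail := PySem.List.slice toks
      (some (((PySem.List.index? toks "agents").getD 0 : Nat) + 1)) none
    match tail with
    | [] => (some "list", [])
    | sub :: rest =>
      if !(PySem.Set.contains AGENTS_SUBCOMMANDS sub) then (none, []) else (sub, rest)

-- ===== PRECONDITION & SPEC =====
def Spec_parse_agents_subcommand_py (args : List String) (out : Option String × List String) : Prop := out = parse_agents_subcommand_py_alt args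
instance (args : List String) (out : Option String × List String) : Decidable (Spec_parse_agents_subcommand_py args out) := by unfold Spec_parse_agents_subcommand_py; infer_instance

-- ===== CLAIM (what is proved, stated in full; the proofs are below) =====
def Claim_equal_parse_agents_subcommand_py : Prop := ∀ (args : List String), Dom_parse_agents_subcommand_py args → Spec_parse_agents_subcommand_py args (parse_agents_subcommand_py args)

-- ===== LEMMAS AND PROOFS =====

-- proof-only helpers: a closed form for the scan over a flag-free token list
def tailCase (t : List String) : Option String × List String :=
  match t with
  | [] => (some "list", [])
  | sub :: rest =>
    if !(PySem.Set.contains AGENTS_SUBCOMMANDS sub) then (none, []) else (sub, rest)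

def scanSpec (toks : List String) : Option String × List String :=
  if !(toks.contains "agents") then (none, [])
  else tailCase (toks.drop (((PySem.List.index? toks "agents").getD 0) + 1))

-- the flag branch of A's loop just drops flag tokens: the loop equals itself on the filtered list
lemma go_filter (l : List String) (found : Bool) (sub : Option String) (rest : List String) :
    parse_agents_go found sub rest l =
      parse_agents_go found sub rest (l.filter (fun a => !(PySem.Str.startswith a "-"))) := by
  induction l generalizing found sub rest with
  | nil => rfl
  | cons a t ih =>
    by_cases h : PySem.Str.startswith a "-" = true
    · have h' : PySem.Chars.startswith a.toList ['-'] = true := by simpa using h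
      simp [parse_agents_go, h, h', ih]
    · simp only [Bool.not_eq_true] at h
      have h' : PySem.Chars.startswith a.toList ['-'] = false := by simpa using h
      simp only [parse_agents_go, h, h', List.filter_cons, Bool.not_false, if_true,
        Bool.false_eq_true, if_false]
      split_ifs <;> simp [ih]

-- once found and sub set, the loop appends every remaining (non-flag) token to rest
lemma go_rest (s : String) (t : List String) (rest : List String)
    (h : ∀ x ∈ t, PySem.Chars.startswith x.toList ['-'] = false) :
    parse_agents_go true (some s) rest t = (some s, rest ++ t) := by
  induction t generalizing rest with
  | nil => simp [parse_agents_go]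
  | cons a t ih =>
    have ha := h a (by simp)
    simp [parse_agents_go, ha, ih _ (fun x hx => h x (by simp [hx]))]

-- just after 'agents': empty tail defaults to "list", else validate the subcommand
lemma go_after (t : List String) (h : ∀ x ∈ t, PySem.Chars.startswith x.toList ['-'] = false) :
    parse_agents_go true none [] t = tailCase t := by
  cases t with
  | nil => rfl
  | cons a t =>
    have ha := h a (by simp)
    simp [parse_agents_go, tailCase, ha, go_rest a t [] (fun x hx => h x (by simp [hx]))]

lemma scanSpec_agents (t : List String) : scanSpec ("agents" :: t) = tailCase t := by
  unfold scanSpec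
  rw [PySem.List.index?_cons_self]
  simp

lemma scanSpec_cons (a : String) (t : List String) (hag : a ≠ "agents") :
    scanSpec (a :: t) = scanSpec t := by
  unfold scanSpec
  rw [PySem.List.index?_cons_of_ne t hag]
  have hne : ("agents" == a) = false := by simp [Ne.symm hag]
  cases hidx : PySem.List.index? t "agents" with
  | none =>
    have hnm : "agents" ∉ t := (PySem.List.index?_eq_none_iff t "agents").1 hidx
    simp [hidx, hnm, Ne.symm hag]
  | some i =>
    have hm : "agents" ∈ t := (PySem.List.index?_isSome_iff t "agents").mp (by rw [hidx]; rfl)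
    simp [hidx, hm]

-- the scan over a flag-free token list equals B's find-and-split
lemma go_scan (toks : List String) (h : ∀ x ∈ toks, PySem.Chars.startswith x.toList ['-'] = false) :
    parse_agents_go false none [] toks = scanSpec toks := by
  induction toks with
  | nil => rfl
  | cons a t ih =>
    have ha := h a (by simp)
    by_cases hag : a = "agents"
    · subst hag
      rw [scanSpec_agents]
      have hafter := go_after t (fun x hx => h x (by simp [hx]))
      have hlit : PySem.Chars.startswith ['a','g','e','n','t','s'] ['-'] = false := by decide
      simp [parse_agents_go, hlit, hafter]
    · rw [scanSpec_cons a t hag]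
      have hne' : (a == "agents") = false := by simp [hag]
      have hrec := ih (fun x hx => h x (by simp [hx]))
      simp [parse_agents_go, ha, hne', hrec]

-- B's slice is a drop
lemma alt_eq_scanSpec (args : List String) :
    parse_agents_subcommand_py_alt args =
      scanSpec (args.filter (fun a => !(PySem.Str.startswith a "-"))) := by
  unfold parse_agents_subcommand_py_alt scanSpec tailCase
  have hs : ∀ (toks : List String),
      PySem.List.slice toks
        (some (((PySem.List.index? toks "agents").getD 0 : Nat) + 1)) none =
      toks.drop (((PySem.List.index? toks "agents").getD 0) + 1) := by
    intro toks
    have := PySem.List.slice_from_natCast (xs := toks)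
      (a := ((PySem.List.index? toks "agents").getD 0) + 1)
    simpa using this
  simp only [hs]

-- ===== VERDICT (by name: the statement is the Claim_ definition above) =====
theorem parse_agents_subcommand_py_spec : Claim_equal_parse_agents_subcommand_py := by
  intro args _
  unfold Spec_parse_agents_subcommand_py parse_agents_subcommand_py
  rw [go_filter, alt_eq_scanSpec]
  refine go_scan _ (fun x hx => ?_)
  have := List.of_mem_filter hx
  simpa using this
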